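-- pv_equiv track=rewrite | github.com/greshbasic/AoC2023 | aoc1.py | lineToNumHelper
-- ===== SOURCE A (Python) =====
-- def lineToNumHelper(line):
--     num_string = ""
--     line_length = len(line)
--     for i in range(line_length):
--         remaining = line_length - i
--         if remaining >= 5:
--             if line[i:(i+4)] == "nine" or line[i] == "9":
--                 num_string += "9"
--             elif line[i:(i+5)] == "eight" or line[i] == "8":
--                 num_string += "8"
--             elif line[i:(i+5)] == "seven" or line[i] == "7":
--                 num_string += "7"
--             elif line[i:(i+3)] == "six" or line[i] == "6":
--                 num_string += "6"
--             elif line[i:(i+4)] == "five" or line[i] == "5":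
--                 num_string += "5"
--             elif line[i] == "4":
--                 num_string += "4"
--             elif line[i:(i+5)] == "three" or line[i] == "3":
--                 num_string += "3"
--             elif line[i:(i+3)] == "two" or line[i] == "2":
--                 num_string += "2"
--             elif line[i:(i+3)] == "one" or line[i] == "1":
--                 num_string += "1"
--
--         elif remaining >= 4:
--             if line[i:(i+4)] == "nine" or line[i] == "9":
--                 num_string += "9"
--             elif line[i] == "8":
--                 num_string += "8"
--             elif line[i] == "7":
--                 num_string += "7"
--             elif line[i:(i+3)] == "six" or line[i] == "6":
--                 num_string += "6"
--             elif line[i:(i+4)] == "five" or line[i] == "5":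
--                 num_string += "5"
--             elif line[i] == "4":
--                 num_string += "4"
--             elif line[i] == "3":
--                 num_string += "3"
--             elif line[i:(i+3)] == "two" or line[i] == "2":
--                 num_string += "2"
--             elif line[i:(i+3)] == "one" or line[i] == "1":
--                 num_string += "1"
--
--         elif remaining >= 3:
--             if line[i] == "9":
--                 num_string += "9"
--             elif line[i] == "8":
--                 num_string += "8"
--             elif line[i] == "7":
--                 num_string += "7"
--             elif line[i:(i+3)] == "six" or line[i] == "6":
--                 num_string += "6"
--             elif line[i] == "5":
--                 num_string += "5"
--             elif line[i] == "4":
--                 num_string += "4"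
--             elif line[i] == "3":
--                 num_string += "3"
--             elif line[i:(i+3)] == "two" or line[i] == "2":
--                 num_string += "2"
--             elif line[i:(i+3)] == "one" or line[i] == "1":
--                 num_string += "1"
--
--         else:
--             if line[i] == "9":
--                 num_string += "9"
--             elif line[i] == "8":
--                 num_string += "8"
--             elif line[i] == "7":
--                 num_string += "7"
--             elif line[i] == "6":
--                 num_string += "6"
--             elif line[i] == "5":
--                 num_string += "5"
--             elif line[i] == "4":
--                 num_string += "4"
--             elif line[i] == "3":
--                 num_string += "3"
--             elif line[i] == "2":
--                 num_string += "2"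
--             elif line[i] == "1":
--                 num_string += "1"
--
--     return num_string
-- ===== SOURCE B (Python) =====
-- # B: pattern-major multi-pass collect-and-sort. For each of the 17 symbols (8 spelled
-- # words -- 'five' but no 'four' -- and the digit characters 1-9, never 0) scan the line
-- # for ALL of its (overlapping) occurrence positions, collect (index, digit) pairs, then
-- # sort by index and join the digits. At most one symbol matches any given position
-- # (words have pairwise-incompatible prefixes and start with letters), so the index
-- # order reproduces A's left-to-right first-match output exactly.
-- _SYMBOLS = [("one", "1"), ("two", "2"), ("three", "3"), ("five", "5"),
--             ("six", "6"), ("seven", "7"), ("eight", "8"), ("nine", "9"),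
--             ("1", "1"), ("2", "2"), ("3", "3"), ("4", "4"), ("5", "5"),
--             ("6", "6"), ("7", "7"), ("8", "8"), ("9", "9")]
--
-- def lineToNumHelper(line):
--     n = len(line)
--     hits = []
--     for pat, d in _SYMBOLS:
--         for i in range(n):
--             if line.startswith(pat, i):
--                 hits.append((i, d))
--     hits.sort(key=lambda h: h[0])
--     return "".join(d for _, d in hits)
-- ===== Notes on version B (the rewrite author's own statement) =====
-- stated objective: alternative
-- what changed: A's single position-major pass with four hand-expanded remaining-length if/elif trees is replaced by a pattern-major collect-and-sort: one pass per symbol (8 digit words incl. 'five', no 'four', plus digit chars 1-9) gathering all overlapping (index, digit) hits, then sorting by index and joining; correct because at most one symbol can match any position.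
import Mathlib
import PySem

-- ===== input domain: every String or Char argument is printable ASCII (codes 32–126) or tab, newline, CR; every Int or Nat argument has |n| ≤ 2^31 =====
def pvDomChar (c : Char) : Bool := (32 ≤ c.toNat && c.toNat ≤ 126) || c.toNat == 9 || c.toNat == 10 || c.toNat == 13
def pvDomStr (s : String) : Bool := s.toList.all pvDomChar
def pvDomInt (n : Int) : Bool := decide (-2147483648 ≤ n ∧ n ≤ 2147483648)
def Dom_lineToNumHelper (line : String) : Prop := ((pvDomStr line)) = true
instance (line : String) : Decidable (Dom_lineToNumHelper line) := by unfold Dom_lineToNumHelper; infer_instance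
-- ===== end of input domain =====

-- B replaces A's position-major pass with four hand-expanded remaining-length branch trees
-- by a pattern-major collect-and-sort: one scan per symbol gathering (index, digit) hits,
-- then a sort by index; objective: alternative.

-- ===== PORT A =====
-- literal transliteration of A: loop over indices, branch on the remaining length,
-- then an if/elif chain of slice comparisons and single-char comparisons.
def lineToNumHelper (line : String) : String :=
  let l := line.toList
  let n : Int := (l.length : Int)
  String.mk ((PySem.List.pyRange 0 n 1).foldl (fun num_string i =>
    let remaining := n - i
    if 5 ≤ remaining then
      if PySem.List.slice l (some i) (some (i+4)) = "nine".toList ∨ PySem.List.pyGetD l i ' ' = '9' then num_string ++ ['9']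
      else if PySem.List.slice l (some i) (some (i+5)) = "eight".toList ∨ PySem.List.pyGetD l i ' ' = '8' then num_string ++ ['8']
      else if PySem.List.slice l (some i) (some (i+5)) = "seven".toList ∨ PySem.List.pyGetD l i ' ' = '7' then num_string ++ ['7']
      else if PySem.List.slice l (some i) (some (i+3)) = "six".toList ∨ PySem.List.pyGetD l i ' ' = '6' then num_string ++ ['6']
      else if PySem.List.slice l (some i) (some (i+4)) = "five".toList ∨ PySem.List.pyGetD l i ' ' = '5' then num_string ++ ['5']
      else if PySem.List.pyGetD l i ' ' = '4' then num_string ++ ['4']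
      else if PySem.List.slice l (some i) (some (i+5)) = "three".toList ∨ PySem.List.pyGetD l i ' ' = '3' then num_string ++ ['3']
      else if PySem.List.slice l (some i) (some (i+3)) = "two".toList ∨ PySem.List.pyGetD l i ' ' = '2' then num_string ++ ['2']
      else if PySem.List.slice l (some i) (some (i+3)) = "one".toList ∨ PySem.List.pyGetD l i ' ' = '1' then num_string ++ ['1']
      else num_string
    else if 4 ≤ remaining then
      if PySem.List.slice l (some i) (some (i+4)) = "nine".toList ∨ PySem.List.pyGetD l i ' ' = '9' then num_string ++ ['9']
      else if PySem.List.pyGetD l i ' ' = '8' then num_string ++ ['8']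
      else if PySem.List.pyGetD l i ' ' = '7' then num_string ++ ['7']
      else if PySem.List.slice l (some i) (some (i+3)) = "six".toList ∨ PySem.List.pyGetD l i ' ' = '6' then num_string ++ ['6']
      else if PySem.List.slice l (some i) (some (i+4)) = "five".toList ∨ PySem.List.pyGetD l i ' ' = '5' then num_string ++ ['5']
      else if PySem.List.pyGetD l i ' ' = '4' then num_string ++ ['4']
      else if PySem.List.pyGetD l i ' ' = '3' then num_string ++ ['3']
      else if PySem.List.slice l (some i) (some (i+3)) = "two".toList ∨ PySem.List.pyGetD l i ' ' = '2' then num_string ++ ['2']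
      else if PySem.List.slice l (some i) (some (i+3)) = "one".toList ∨ PySem.List.pyGetD l i ' ' = '1' then num_string ++ ['1']
      else num_string
    else if 3 ≤ remaining then
      if PySem.List.pyGetD l i ' ' = '9' then num_string ++ ['9']
      else if PySem.List.pyGetD l i ' ' = '8' then num_string ++ ['8']
      else if PySem.List.pyGetD l i ' ' = '7' then num_string ++ ['7']
      else if PySem.List.slice l (some i) (some (i+3)) = "six".toList ∨ PySem.List.pyGetD l i ' ' = '6' then num_string ++ ['6']
      else if PySem.List.pyGetD l i ' ' = '5' then num_string ++ ['5']
      else if PySem.List.pyGetD l i ' ' = '4' then num_string ++ ['4']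
      else if PySem.List.pyGetD l i ' ' = '3' then num_string ++ ['3']
      else if PySem.List.slice l (some i) (some (i+3)) = "two".toList ∨ PySem.List.pyGetD l i ' ' = '2' then num_string ++ ['2']
      else if PySem.List.slice l (some i) (some (i+3)) = "one".toList ∨ PySem.List.pyGetD l i ' ' = '1' then num_string ++ ['1']
      else num_string
    else
      if PySem.List.pyGetD l i ' ' = '9' then num_string ++ ['9']
      else if PySem.List.pyGetD l i ' ' = '8' then num_string ++ ['8']
      else if PySem.List.pyGetD l i ' ' = '7' then num_string ++ ['7']
      else if PySem.List.pyGetD l i ' ' = '6' then num_string ++ ['6']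
      else if PySem.List.pyGetD l i ' ' = '5' then num_string ++ ['5']
      else if PySem.List.pyGetD l i ' ' = '4' then num_string ++ ['4']
      else if PySem.List.pyGetD l i ' ' = '3' then num_string ++ ['3']
      else if PySem.List.pyGetD l i ' ' = '2' then num_string ++ ['2']
      else if PySem.List.pyGetD l i ' ' = '1' then num_string ++ ['1']
      else num_string) [])

-- ===== PORT B =====
-- B's symbol table _SYMBOLS (8 spelled words — 'five' but no 'four' — plus digit chars 1-9)
def pvSymbols : List (List Char × Char) :=
  [("one".toList, '1'), ("two".toList, '2'), ("three".toList, '3'), ("five".toList, '5'),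
   ("six".toList, '6'), ("seven".toList, '7'), ("eight".toList, '8'), ("nine".toList, '9'),
   (['1'], '1'), (['2'], '2'), (['3'], '3'), (['4'], '4'), (['5'], '5'),
   (['6'], '6'), (['7'], '7'), (['8'], '8'), (['9'], '9')]

-- literal transliteration of B: for each symbol scan all positions collecting (index, digit)
-- hits (line.startswith(pat, i) with 0 ≤ i < len is exactly a prefix test on the suffix,
-- ported as PySem.Chars.startswith on l.drop i.toNat), then sort by index and join.
def lineToNumHelper_alt (line : String) : String :=
  let l := line.toList
  let n : Int := (l.length : Int)
  let hits := pvSymbols.foldl (fun hits pd =>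
    (PySem.List.pyRange 0 n 1).foldl (fun hits i =>
      if PySem.Chars.startswith (l.drop i.toNat) pd.1 then hits ++ [(i, pd.2)] else hits) hits) []
  let shits := PySem.List.sorted hits (fun h => h.1) false
  String.mk (shits.map (fun h => h.2))

-- ===== PRECONDITION & SPEC =====
def Spec_lineToNumHelper (line : String) (out : String) : Prop := out = lineToNumHelper_alt line
instance (line : String) (out : String) : Decidable (Spec_lineToNumHelper line out) := by unfold Spec_lineToNumHelper; infer_instance

-- ===== CLAIM (what is proved, stated in full; the proofs are below) =====
def Claim_equal_lineToNumHelper : Prop := ∀ (line : String), Dom_lineToNumHelper line → Spec_lineToNumHelper line (lineToNumHelper line)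

-- ===== LEMMAS AND PROOFS =====

-- A's per-position contribution, phrased on the suffix s = l.drop i (slices of length m at i
-- become 'take m', line[i] becomes 's.getD 0', remaining becomes s.length).
def pvTokA (s : List Char) : List Char :=
  if 5 ≤ s.length then
    if s.take 4 = "nine".toList ∨ s.getD 0 ' ' = '9' then ['9']
    else if s.take 5 = "eight".toList ∨ s.getD 0 ' ' = '8' then ['8']
    else if s.take 5 = "seven".toList ∨ s.getD 0 ' ' = '7' then ['7']
    else if s.take 3 = "six".toList ∨ s.getD 0 ' ' = '6' then ['6']
    else if s.take 4 = "five".toList ∨ s.getD 0 ' ' = '5' then ['5']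
    else if s.getD 0 ' ' = '4' then ['4']
    else if s.take 5 = "three".toList ∨ s.getD 0 ' ' = '3' then ['3']
    else if s.take 3 = "two".toList ∨ s.getD 0 ' ' = '2' then ['2']
    else if s.take 3 = "one".toList ∨ s.getD 0 ' ' = '1' then ['1']
    else []
  else if 4 ≤ s.length then
    if s.take 4 = "nine".toList ∨ s.getD 0 ' ' = '9' then ['9']
    else if s.getD 0 ' ' = '8' then ['8']
    else if s.getD 0 ' ' = '7' then ['7']
    else if s.take 3 = "six".toList ∨ s.getD 0 ' ' = '6' then ['6']
    else if s.take 4 = "five".toList ∨ s.getD 0 ' ' = '5' then ['5']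
    else if s.getD 0 ' ' = '4' then ['4']
    else if s.getD 0 ' ' = '3' then ['3']
    else if s.take 3 = "two".toList ∨ s.getD 0 ' ' = '2' then ['2']
    else if s.take 3 = "one".toList ∨ s.getD 0 ' ' = '1' then ['1']
    else []
  else if 3 ≤ s.length then
    if s.getD 0 ' ' = '9' then ['9']
    else if s.getD 0 ' ' = '8' then ['8']
    else if s.getD 0 ' ' = '7' then ['7']
    else if s.take 3 = "six".toList ∨ s.getD 0 ' ' = '6' then ['6']
    else if s.getD 0 ' ' = '5' then ['5']
    else if s.getD 0 ' ' = '4' then ['4']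
    else if s.getD 0 ' ' = '3' then ['3']
    else if s.take 3 = "two".toList ∨ s.getD 0 ' ' = '2' then ['2']
    else if s.take 3 = "one".toList ∨ s.getD 0 ' ' = '1' then ['1']
    else []
  else
    if s.getD 0 ' ' = '9' then ['9']
    else if s.getD 0 ' ' = '8' then ['8']
    else if s.getD 0 ' ' = '7' then ['7']
    else if s.getD 0 ' ' = '6' then ['6']
    else if s.getD 0 ' ' = '5' then ['5']
    else if s.getD 0 ' ' = '4' then ['4']
    else if s.getD 0 ' ' = '3' then ['3']
    else if s.getD 0 ' ' = '2' then ['2']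
    else if s.getD 0 ' ' = '1' then ['1']
    else []

lemma pvTokA_len (s : List Char) : (pvTokA s).length ≤ 1 := by
  have hite : ∀ (p : Prop) (_ : Decidable p) (a b : List Char),
      a.length ≤ 1 → b.length ≤ 1 → (if p then a else b).length ≤ 1 := by
    intro p inst a b ha hb; split <;> assumption
  unfold pvTokA
  repeat' (first | apply hite | decide)

-- the symbols matching at a position, in table order, yield exactly A's contribution there
lemma pvMatch (s : List Char) :
    (pvSymbols.filter (fun pd => PySem.Chars.startswith s pd.1)).map (fun pd => pd.2) = pvTokA s := by
  have e_nine : "nine".toList = ['n', 'i', 'n', 'e'] := by decide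
  have e_eight : "eight".toList = ['e', 'i', 'g', 'h', 't'] := by decide
  have e_seven : "seven".toList = ['s', 'e', 'v', 'e', 'n'] := by decide
  have e_six : "six".toList = ['s', 'i', 'x'] := by decide
  have e_five : "five".toList = ['f', 'i', 'v', 'e'] := by decide
  have e_three : "three".toList = ['t', 'h', 'r', 'e', 'e'] := by decide
  have e_two : "two".toList = ['t', 'w', 'o'] := by decide
  have e_one : "one".toList = ['o', 'n', 'e'] := by decide
  match s with
  | [] => decide
  | c :: t =>
    by_cases hd9 : c = '9'
    · subst hd9; simp [pvTokA, pvSymbols, e_nine, e_eight, e_seven, e_six, e_five, e_three, e_two, e_one, PySem.Chars.startswith, List.isPrefixOf, List.filter]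
    by_cases hd8 : c = '8'
    · subst hd8; simp [pvTokA, pvSymbols, e_nine, e_eight, e_seven, e_six, e_five, e_three, e_two, e_one, PySem.Chars.startswith, List.isPrefixOf, List.filter]
    by_cases hd7 : c = '7'
    · subst hd7; simp [pvTokA, pvSymbols, e_nine, e_eight, e_seven, e_six, e_five, e_three, e_two, e_one, PySem.Chars.startswith, List.isPrefixOf, List.filter]
    by_cases hd6 : c = '6'
    · subst hd6; simp [pvTokA, pvSymbols, e_nine, e_eight, e_seven, e_six, e_five, e_three, e_two, e_one, PySem.Chars.startswith, List.isPrefixOf, List.filter]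
    by_cases hd5 : c = '5'
    · subst hd5; simp [pvTokA, pvSymbols, e_nine, e_eight, e_seven, e_six, e_five, e_three, e_two, e_one, PySem.Chars.startswith, List.isPrefixOf, List.filter]
    by_cases hd4 : c = '4'
    · subst hd4; simp [pvTokA, pvSymbols, e_nine, e_eight, e_seven, e_six, e_five, e_three, e_two, e_one, PySem.Chars.startswith, List.isPrefixOf, List.filter]
    by_cases hd3 : c = '3'
    · subst hd3; simp [pvTokA, pvSymbols, e_nine, e_eight, e_seven, e_six, e_five, e_three, e_two, e_one, PySem.Chars.startswith, List.isPrefixOf, List.filter]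
    by_cases hd2 : c = '2'
    · subst hd2; simp [pvTokA, pvSymbols, e_nine, e_eight, e_seven, e_six, e_five, e_three, e_two, e_one, PySem.Chars.startswith, List.isPrefixOf, List.filter]
    by_cases hd1 : c = '1'
    · subst hd1; simp [pvTokA, pvSymbols, e_nine, e_eight, e_seven, e_six, e_five, e_three, e_two, e_one, PySem.Chars.startswith, List.isPrefixOf, List.filter]
    by_cases hw_nine : "nine".toList <+: c :: t
    · obtain ⟨r, hr⟩ := hw_nine
      rw [e_nine] at hr
      simp only [List.cons_append, List.nil_append, List.cons.injEq] at hr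
      obtain ⟨rfl, rfl⟩ := hr
      simp [pvTokA, pvSymbols, e_nine, e_eight, e_seven, e_six, e_five, e_three, e_two, e_one, PySem.Chars.startswith, List.isPrefixOf, List.filter]
    by_cases hw_eight : "eight".toList <+: c :: t
    · obtain ⟨r, hr⟩ := hw_eight
      rw [e_eight] at hr
      simp only [List.cons_append, List.nil_append, List.cons.injEq] at hr
      obtain ⟨rfl, rfl⟩ := hr
      simp [pvTokA, pvSymbols, e_nine, e_eight, e_seven, e_six, e_five, e_three, e_two, e_one, PySem.Chars.startswith, List.isPrefixOf, List.filter]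
    by_cases hw_seven : "seven".toList <+: c :: t
    · obtain ⟨r, hr⟩ := hw_seven
      rw [e_seven] at hr
      simp only [List.cons_append, List.nil_append, List.cons.injEq] at hr
      obtain ⟨rfl, rfl⟩ := hr
      simp [pvTokA, pvSymbols, e_nine, e_eight, e_seven, e_six, e_five, e_three, e_two, e_one, PySem.Chars.startswith, List.isPrefixOf, List.filter]
    by_cases hw_six : "six".toList <+: c :: t
    · obtain ⟨r, hr⟩ := hw_six
      rw [e_six] at hr
      simp only [List.cons_append, List.nil_append, List.cons.injEq] at hr
      obtain ⟨rfl, rfl⟩ := hr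
      simp [pvTokA, pvSymbols, e_nine, e_eight, e_seven, e_six, e_five, e_three, e_two, e_one, PySem.Chars.startswith, List.isPrefixOf, List.filter]
    by_cases hw_five : "five".toList <+: c :: t
    · obtain ⟨r, hr⟩ := hw_five
      rw [e_five] at hr
      simp only [List.cons_append, List.nil_append, List.cons.injEq] at hr
      obtain ⟨rfl, rfl⟩ := hr
      simp [pvTokA, pvSymbols, e_nine, e_eight, e_seven, e_six, e_five, e_three, e_two, e_one, PySem.Chars.startswith, List.isPrefixOf, List.filter]
    by_cases hw_three : "three".toList <+: c :: t
    · obtain ⟨r, hr⟩ := hw_three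
      rw [e_three] at hr
      simp only [List.cons_append, List.nil_append, List.cons.injEq] at hr
      obtain ⟨rfl, rfl⟩ := hr
      simp [pvTokA, pvSymbols, e_nine, e_eight, e_seven, e_six, e_five, e_three, e_two, e_one, PySem.Chars.startswith, List.isPrefixOf, List.filter]
    by_cases hw_two : "two".toList <+: c :: t
    · obtain ⟨r, hr⟩ := hw_two
      rw [e_two] at hr
      simp only [List.cons_append, List.nil_append, List.cons.injEq] at hr
      obtain ⟨rfl, rfl⟩ := hr
      simp [pvTokA, pvSymbols, e_nine, e_eight, e_seven, e_six, e_five, e_three, e_two, e_one, PySem.Chars.startswith, List.isPrefixOf, List.filter]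
    by_cases hw_one : "one".toList <+: c :: t
    · obtain ⟨r, hr⟩ := hw_one
      rw [e_one] at hr
      simp only [List.cons_append, List.nil_append, List.cons.injEq] at hr
      obtain ⟨rfl, rfl⟩ := hr
      simp [pvTokA, pvSymbols, e_nine, e_eight, e_seven, e_six, e_five, e_three, e_two, e_one, PySem.Chars.startswith, List.isPrefixOf, List.filter]
    have hn_nine : (c :: t).take 4 ≠ "nine".toList := fun h => hw_nine (h ▸ List.take_prefix 4 (c :: t))
    have b_nine : List.isPrefixOf "nine".toList (c :: t) = false := by
      simp only [Bool.eq_false_iff, ne_eq, List.isPrefixOf_iff_prefix]; exact hw_nine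
    have hn_eight : (c :: t).take 5 ≠ "eight".toList := fun h => hw_eight (h ▸ List.take_prefix 5 (c :: t))
    have b_eight : List.isPrefixOf "eight".toList (c :: t) = false := by
      simp only [Bool.eq_false_iff, ne_eq, List.isPrefixOf_iff_prefix]; exact hw_eight
    have hn_seven : (c :: t).take 5 ≠ "seven".toList := fun h => hw_seven (h ▸ List.take_prefix 5 (c :: t))
    have b_seven : List.isPrefixOf "seven".toList (c :: t) = false := by
      simp only [Bool.eq_false_iff, ne_eq, List.isPrefixOf_iff_prefix]; exact hw_seven
    have hn_six : (c :: t).take 3 ≠ "six".toList := fun h => hw_six (h ▸ List.take_prefix 3 (c :: t))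
    have b_six : List.isPrefixOf "six".toList (c :: t) = false := by
      simp only [Bool.eq_false_iff, ne_eq, List.isPrefixOf_iff_prefix]; exact hw_six
    have hn_five : (c :: t).take 4 ≠ "five".toList := fun h => hw_five (h ▸ List.take_prefix 4 (c :: t))
    have b_five : List.isPrefixOf "five".toList (c :: t) = false := by
      simp only [Bool.eq_false_iff, ne_eq, List.isPrefixOf_iff_prefix]; exact hw_five
    have hn_three : (c :: t).take 5 ≠ "three".toList := fun h => hw_three (h ▸ List.take_prefix 5 (c :: t))
    have b_three : List.isPrefixOf "three".toList (c :: t) = false := by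
      simp only [Bool.eq_false_iff, ne_eq, List.isPrefixOf_iff_prefix]; exact hw_three
    have hn_two : (c :: t).take 3 ≠ "two".toList := fun h => hw_two (h ▸ List.take_prefix 3 (c :: t))
    have b_two : List.isPrefixOf "two".toList (c :: t) = false := by
      simp only [Bool.eq_false_iff, ne_eq, List.isPrefixOf_iff_prefix]; exact hw_two
    have hn_one : (c :: t).take 3 ≠ "one".toList := fun h => hw_one (h ▸ List.take_prefix 3 (c :: t))
    have b_one : List.isPrefixOf "one".toList (c :: t) = false := by
      simp only [Bool.eq_false_iff, ne_eq, List.isPrefixOf_iff_prefix]; exact hw_one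
    simp only [e_nine, e_eight, e_seven, e_six, e_five, e_three, e_two, e_one] at b_nine b_eight b_seven b_six b_five b_three b_two b_one
    simp only [List.take_succ_cons, e_nine, e_eight, e_seven, e_six, e_five, e_three, e_two, e_one] at hn_nine hn_eight hn_seven hn_six hn_five hn_three hn_two hn_one
    have bd1 : List.isPrefixOf ['1'] (c :: t) = false := by simp [List.isPrefixOf, Ne.symm hd1]
    have bd2 : List.isPrefixOf ['2'] (c :: t) = false := by simp [List.isPrefixOf, Ne.symm hd2]
    have bd3 : List.isPrefixOf ['3'] (c :: t) = false := by simp [List.isPrefixOf, Ne.symm hd3]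
    have bd4 : List.isPrefixOf ['4'] (c :: t) = false := by simp [List.isPrefixOf, Ne.symm hd4]
    have bd5 : List.isPrefixOf ['5'] (c :: t) = false := by simp [List.isPrefixOf, Ne.symm hd5]
    have bd6 : List.isPrefixOf ['6'] (c :: t) = false := by simp [List.isPrefixOf, Ne.symm hd6]
    have bd7 : List.isPrefixOf ['7'] (c :: t) = false := by simp [List.isPrefixOf, Ne.symm hd7]
    have bd8 : List.isPrefixOf ['8'] (c :: t) = false := by simp [List.isPrefixOf, Ne.symm hd8]
    have bd9 : List.isPrefixOf ['9'] (c :: t) = false := by simp [List.isPrefixOf, Ne.symm hd9]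
    simp [pvTokA, pvSymbols, e_nine, e_eight, e_seven, e_six, e_five, e_three, e_two, e_one, PySem.Chars.startswith, List.filter,
      hd1, hd2, hd3, hd4, hd5, hd6, hd7, hd8, hd9,
      hn_nine, hn_eight, hn_seven, hn_six, hn_five, hn_three, hn_two, hn_one,
      b_nine, b_eight, b_seven, b_six, b_five, b_three, b_two, b_one,
      bd1, bd2, bd3, bd4, bd5, bd6, bd7, bd8, bd9]

lemma pvA_step (l : List Char) (num : List Char) (i : Int) (h0 : 0 ≤ i) (h1 : i < (l.length : Int)) :
    (if 5 ≤ ((l.length : Int) - i) then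
      if PySem.List.slice l (some i) (some (i+4)) = "nine".toList ∨ PySem.List.pyGetD l i ' ' = '9' then num ++ ['9']
      else if PySem.List.slice l (some i) (some (i+5)) = "eight".toList ∨ PySem.List.pyGetD l i ' ' = '8' then num ++ ['8']
      else if PySem.List.slice l (some i) (some (i+5)) = "seven".toList ∨ PySem.List.pyGetD l i ' ' = '7' then num ++ ['7']
      else if PySem.List.slice l (some i) (some (i+3)) = "six".toList ∨ PySem.List.pyGetD l i ' ' = '6' then num ++ ['6']
      else if PySem.List.slice l (some i) (some (i+4)) = "five".toList ∨ PySem.List.pyGetD l i ' ' = '5' then num ++ ['5']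
      else if PySem.List.pyGetD l i ' ' = '4' then num ++ ['4']
      else if PySem.List.slice l (some i) (some (i+5)) = "three".toList ∨ PySem.List.pyGetD l i ' ' = '3' then num ++ ['3']
      else if PySem.List.slice l (some i) (some (i+3)) = "two".toList ∨ PySem.List.pyGetD l i ' ' = '2' then num ++ ['2']
      else if PySem.List.slice l (some i) (some (i+3)) = "one".toList ∨ PySem.List.pyGetD l i ' ' = '1' then num ++ ['1']
      else num
     else if 4 ≤ ((l.length : Int) - i) then
      if PySem.List.slice l (some i) (some (i+4)) = "nine".toList ∨ PySem.List.pyGetD l i ' ' = '9' then num ++ ['9']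
      else if PySem.List.pyGetD l i ' ' = '8' then num ++ ['8']
      else if PySem.List.pyGetD l i ' ' = '7' then num ++ ['7']
      else if PySem.List.slice l (some i) (some (i+3)) = "six".toList ∨ PySem.List.pyGetD l i ' ' = '6' then num ++ ['6']
      else if PySem.List.slice l (some i) (some (i+4)) = "five".toList ∨ PySem.List.pyGetD l i ' ' = '5' then num ++ ['5']
      else if PySem.List.pyGetD l i ' ' = '4' then num ++ ['4']
      else if PySem.List.pyGetD l i ' ' = '3' then num ++ ['3']
      else if PySem.List.slice l (some i) (some (i+3)) = "two".toList ∨ PySem.List.pyGetD l i ' ' = '2' then num ++ ['2']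
      else if PySem.List.slice l (some i) (some (i+3)) = "one".toList ∨ PySem.List.pyGetD l i ' ' = '1' then num ++ ['1']
      else num
     else if 3 ≤ ((l.length : Int) - i) then
      if PySem.List.pyGetD l i ' ' = '9' then num ++ ['9']
      else if PySem.List.pyGetD l i ' ' = '8' then num ++ ['8']
      else if PySem.List.pyGetD l i ' ' = '7' then num ++ ['7']
      else if PySem.List.slice l (some i) (some (i+3)) = "six".toList ∨ PySem.List.pyGetD l i ' ' = '6' then num ++ ['6']
      else if PySem.List.pyGetD l i ' ' = '5' then num ++ ['5']
      else if PySem.List.pyGetD l i ' ' = '4' then num ++ ['4']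
      else if PySem.List.pyGetD l i ' ' = '3' then num ++ ['3']
      else if PySem.List.slice l (some i) (some (i+3)) = "two".toList ∨ PySem.List.pyGetD l i ' ' = '2' then num ++ ['2']
      else if PySem.List.slice l (some i) (some (i+3)) = "one".toList ∨ PySem.List.pyGetD l i ' ' = '1' then num ++ ['1']
      else num
     else
      if PySem.List.pyGetD l i ' ' = '9' then num ++ ['9']
      else if PySem.List.pyGetD l i ' ' = '8' then num ++ ['8']
      else if PySem.List.pyGetD l i ' ' = '7' then num ++ ['7']
      else if PySem.List.pyGetD l i ' ' = '6' then num ++ ['6']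
      else if PySem.List.pyGetD l i ' ' = '5' then num ++ ['5']
      else if PySem.List.pyGetD l i ' ' = '4' then num ++ ['4']
      else if PySem.List.pyGetD l i ' ' = '3' then num ++ ['3']
      else if PySem.List.pyGetD l i ' ' = '2' then num ++ ['2']
      else if PySem.List.pyGetD l i ' ' = '1' then num ++ ['1']
      else num)
    = num ++ pvTokA (l.drop i.toNat) := by
  have hk : i.toNat < l.length := by omega
  have h3 : PySem.List.slice l (some i) (some (i+3)) = (l.drop i.toNat).take 3 := by
    rw [PySem.List.slice_toNat l h0 (by omega)]; congr 1; omega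
  have h4 : PySem.List.slice l (some i) (some (i+4)) = (l.drop i.toNat).take 4 := by
    rw [PySem.List.slice_toNat l h0 (by omega)]; congr 1; omega
  have h5 : PySem.List.slice l (some i) (some (i+5)) = (l.drop i.toNat).take 5 := by
    rw [PySem.List.slice_toNat l h0 (by omega)]; congr 1; omega
  have hg : PySem.List.pyGetD l i ' ' = (l.drop i.toNat).getD 0 ' ' := by
    rw [PySem.List.pyGetD_eq_getElem l ' ' h0 h1]
    simp [List.getD, List.getElem?_drop, List.getElem?_eq_getElem hk]
  have e5 : (5 ≤ (l.length : Int) - i) ↔ (5 ≤ (l.drop i.toNat).length) := by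
    rw [List.length_drop]; omega
  have e4 : (4 ≤ (l.length : Int) - i) ↔ (4 ≤ (l.drop i.toNat).length) := by
    rw [List.length_drop]; omega
  have e3 : (3 ≤ (l.length : Int) - i) ↔ (3 ≤ (l.drop i.toNat).length) := by
    rw [List.length_drop]; omega
  rw [h3, h4, h5, hg]
  simp only [pvTokA, e5, e4, e3]
  simp only [apply_ite (fun x : List Char => num ++ x), List.append_nil]

-- flatMap of a guarded singleton is map-of-filter
lemma pvFlatMapIf {β γ : Type} (ys : List β) (p : β → Bool) (f : β → γ) :
    (ys.flatMap fun b => if p b then [f b] else []) = (ys.filter p).map f := by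
  induction ys with
  | nil => rfl
  | cons y t ih => by_cases h : p y <;> simp [List.flatMap_cons, h, ih]

-- flatMap distributes over pointwise append, up to permutation
lemma pvFlatMapApp {β γ : Type} (ys : List β) (g h : β → List γ) :
    (ys.flatMap fun b => g b ++ h b).Perm (ys.flatMap g ++ ys.flatMap h) := by
  induction ys with
  | nil => simp
  | cons y t ih =>
    simp only [List.flatMap_cons, List.append_assoc]
    exact (((ih.append_left (h y)).trans (List.perm_append_comm_assoc _ _ _)).append_left (g y))

-- exchanging the two nested collection passes is a permutation
lemma pvSwapPerm {α β γ : Type} (xs : List α) (ys : List β) (p : α → β → Bool) (f : α → β → γ) :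
    (xs.flatMap fun a => (ys.filter (fun b => p a b)).map (fun b => f a b)).Perm
    (ys.flatMap fun b => ((xs.filter (fun a => p a b)).map (fun a => f a b))) := by
  induction xs with
  | nil => simp
  | cons a xs ih =>
    have hsplit : ∀ b, ((a :: xs).filter (fun a => p a b)).map (fun a => f a b)
        = (if p a b then [f a b] else []) ++ (xs.filter (fun a => p a b)).map (fun a => f a b) := by
      intro b; by_cases h : p a b <;> simp [h]
    simp only [List.flatMap_cons, hsplit]
    have h1 := pvFlatMapApp ys (fun b => if p a b then [f a b] else [])
      (fun b => (xs.filter (fun a => p a b)).map (fun a => f a b))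
    rw [pvFlatMapIf] at h1
    exact (ih.append_left _).trans h1.symm

lemma pvPairwise_of_len_le_one {γ : Type} (R : γ → γ → Prop) (xs : List γ) (h : xs.length ≤ 1) :
    xs.Pairwise R := by
  match xs with
  | [] => exact List.Pairwise.nil
  | [x] => exact List.pairwise_singleton R x
  | x :: y :: t => simp at h

-- the sorted hit list is exactly the index-ordered list of per-position matches
lemma pvSortedHits (l : List Char) :
    PySem.List.sorted
      (pvSymbols.flatMap (fun pd => ((PySem.List.pyRange 0 (l.length : Int) 1).filter
        (fun i => PySem.Chars.startswith (l.drop i.toNat) pd.1)).map (fun i => (i, pd.2))))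
      (fun h => h.1) false
    = (PySem.List.pyRange 0 (l.length : Int) 1).flatMap (fun i =>
        (pvSymbols.filter (fun pd => PySem.Chars.startswith (l.drop i.toNat) pd.1)).map (fun pd => (i, pd.2))) := by
  apply PySem.List.sorted_eq_of_perm_of_pairwise_lt
  · exact (pvSwapPerm (PySem.List.pyRange 0 (l.length : Int) 1) pvSymbols
      (fun i pd => PySem.Chars.startswith (l.drop i.toNat) pd.1) (fun i pd => (i, pd.2))).symm.symm
  · rw [List.pairwise_flatMap]
    constructor
    · intro i _
      apply pvPairwise_of_len_le_one
      have := pvMatch (l.drop i.toNat)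
      have hlen := congrArg List.length this
      simp only [List.length_map] at hlen ⊢
      rw [hlen]; exact pvTokA_len _
    · have hp := PySem.List.pairwise_lt_pyRange_one (a := (0 : Int)) (b := (l.length : Int))
      refine hp.imp_of_mem ?_
      intro i j _ _ hij x hx y hy
      simp only [List.mem_map] at hx hy
      obtain ⟨_, _, rfl⟩ := hx
      obtain ⟨_, _, rfl⟩ := hy
      exact hij

-- ===== VERDICT (by name: the statement is the Claim_ definition above) =====
theorem lineToNumHelper_spec : Claim_equal_lineToNumHelper := by
  intro line _
  unfold Spec_lineToNumHelper lineToNumHelper lineToNumHelper_alt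
  simp only []
  congr 1
  conv_lhs => rw [PySem.List.foldl_congr_mem _ _ (fun num i => num ++ pvTokA (line.toList.drop i.toNat)) _
        (fun acc x hx => by
          have h := PySem.List.mem_pyRange_one.mp hx
          exact pvA_step line.toList acc x h.1 h.2),
      PySem.List.foldl_append_eq_flatMap]
  have hfold : (pvSymbols.foldl (fun (hits : List (Int × Char)) pd =>
        (PySem.List.pyRange 0 (line.toList.length : Int) 1).foldl (fun hits i =>
          if PySem.Chars.startswith (line.toList.drop i.toNat) pd.1 then hits ++ [(i, pd.2)] else hits) hits) [])
      = pvSymbols.flatMap (fun pd => ((PySem.List.pyRange 0 (line.toList.length : Int) 1).filter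
          (fun i => PySem.Chars.startswith (line.toList.drop i.toNat) pd.1)).map (fun i => (i, pd.2))) := by
    rw [PySem.List.foldl_congr_mem pvSymbols _
        (fun hits pd => hits ++ ((PySem.List.pyRange 0 (line.toList.length : Int) 1).filter
          (fun i => PySem.Chars.startswith (line.toList.drop i.toNat) pd.1)).map (fun i => (i, pd.2))) []
        (fun acc pd _ => PySem.List.foldl_append_if
          (fun i => PySem.Chars.startswith (line.toList.drop i.toNat) pd.1)
          (fun i => (i, pd.2)) (PySem.List.pyRange 0 (line.toList.length : Int) 1) acc),
      PySem.List.foldl_append_eq_flatMap, List.nil_append]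
  rw [hfold]
  rw [pvSortedHits, List.map_flatMap]
  have hblk : ∀ (i : Int),
      ((pvSymbols.filter (fun pd => PySem.Chars.startswith (line.toList.drop i.toNat) pd.1)).map
        (fun pd => (i, pd.2))).map (fun h => h.2) = pvTokA (line.toList.drop i.toNat) := by
    intro i; rw [List.map_map]; exact pvMatch (line.toList.drop i.toNat)
  simp only [hblk]
  exact List.nil_append _
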